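-- pv_equiv track=rewrite | github.com/hdrive00/hiepnd | app.py | ultra_split_sentences
-- ===== SOURCE A (Python) =====
-- def ultra_split_sentences(paragraph, max_words=5):
--     words = paragraph.strip().split()
--     chunks, temp = [], []
--     for word in words:
--         temp.append(word)
--         if len(temp) >= max_words:
--             chunks.append(' '.join(temp))
--             temp = []
--     if temp:
--         chunks.append(' '.join(temp))
--     return chunks
-- ===== SOURCE B (Python) =====
-- def ultra_split_sentences(paragraph, max_words=5):
--     words = paragraph.strip().split()
--     step = max(max_words, 1)
--     return [' '.join(words[i:i + step]) for i in range(0, len(words), step)]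
-- ===== Notes on version B (the rewrite author's own statement) =====
-- stated objective: idiomatic
-- what changed: Replaces A's temp-buffer accumulation with flush-on-length by a single comprehension that strides over chunk start indices with range(0, len(words), step) and joins each slice, with step = max(max_words, 1) covering the degenerate max_words <= 0 case (one word per chunk, as A behaves).
import Mathlib
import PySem

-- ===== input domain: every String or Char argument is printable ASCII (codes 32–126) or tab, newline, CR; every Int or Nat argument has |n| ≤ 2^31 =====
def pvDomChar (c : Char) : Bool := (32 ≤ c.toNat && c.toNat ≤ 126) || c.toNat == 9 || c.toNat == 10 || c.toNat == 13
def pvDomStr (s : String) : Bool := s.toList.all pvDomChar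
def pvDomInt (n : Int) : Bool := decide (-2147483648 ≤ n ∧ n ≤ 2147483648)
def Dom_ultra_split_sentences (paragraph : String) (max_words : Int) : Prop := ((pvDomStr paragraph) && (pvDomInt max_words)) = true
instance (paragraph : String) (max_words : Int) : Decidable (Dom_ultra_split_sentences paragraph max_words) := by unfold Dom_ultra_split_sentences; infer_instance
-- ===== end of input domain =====

-- B replaces A's temp-buffer/flush accumulation by striding over chunk start indices and joining slices; objective: idiomatic (no speed claim).


-- ===== PORT A =====
-- loop body of A's 'for word in words' (temp.append; flush when len(temp) >= max_words)
def ussStep (max_words : Int) (acc : List String × List String) (word : String) : List String × List String :=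
  let temp := acc.2 ++ [word]
  if max_words ≤ (temp.length : Int) then (acc.1 ++ [PySem.Str.join " " temp], [])
  else (acc.1, temp)

def ultra_split_sentences (paragraph : String) (max_words : Int) : List String :=
  let words := PySem.Str.split₀ (PySem.Str.strip paragraph)
  let st := words.foldl (ussStep max_words) ([], [])
  if st.2 ≠ [] then st.1 ++ [PySem.Str.join " " st.2] else st.1

-- ===== PORT B =====
def ultra_split_sentences_alt (paragraph : String) (max_words : Int) : List String :=
  let words := PySem.Str.split₀ (PySem.Str.strip paragraph)
  let step : Int := max max_words 1
  (PySem.List.pyRange 0 (words.length : Int) step).map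
    (fun i => PySem.Str.join " " (PySem.List.slice words (some i) (some (i + step))))

-- ===== PRECONDITION & SPEC =====
def Spec_ultra_split_sentences (paragraph : String) (max_words : Int) (out : List String) : Prop := out = ultra_split_sentences_alt paragraph max_words
instance (paragraph : String) (max_words : Int) (out : List String) : Decidable (Spec_ultra_split_sentences paragraph max_words out) := by unfold Spec_ultra_split_sentences; infer_instance

-- ===== CLAIM (what is proved, stated in full; the proofs are below) =====
def Claim_equal_ultra_split_sentences : Prop := ∀ (paragraph : String) (max_words : Int), Dom_ultra_split_sentences paragraph max_words → Spec_ultra_split_sentences paragraph max_words (ultra_split_sentences paragraph max_words)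

-- ===== LEMMAS AND PROOFS =====

-- the common chunking both programs compute: groups of s consecutive words, joined
def chunksOf (s : Nat) : List String → List String
  | [] => []
  | w :: ws => PySem.Str.join " " (w :: ws.take (s - 1)) :: chunksOf s (ws.drop (s - 1))
termination_by ws => ws.length
decreasing_by simp

lemma chunksOf_eq_cons (s : Nat) (hs : 1 ≤ s) (l : List String) (hl : l ≠ []) :
    chunksOf s l = PySem.Str.join " " (l.take s) :: chunksOf s (l.drop s) := by
  cases l with
  | nil => exact absurd rfl hl
  | cons w ws =>
    obtain ⟨k, rfl⟩ : ∃ k, s = k + 1 := ⟨s - 1, by omega⟩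
    rw [chunksOf.eq_def]
    simp

lemma s_pos (mw : Int) : 0 < (max mw 1).toNat := by
  rw [Int.max_def]; split_ifs <;> omega

lemma uss_cond_iff (mw : Int) (n : Nat) :
    (mw ≤ ((n + 1 : Nat) : Int)) ↔ (max mw 1).toNat ≤ n + 1 := by
  rw [Int.max_def]; split_ifs <;> omega

def ussFinish (st : List String × List String) : List String :=
  if st.2 ≠ [] then st.1 ++ [PySem.Str.join " " st.2] else st.1

lemma loopA (mw : Int) (ws : List String) : ∀ (t c : List String),
    t.length < (max mw 1).toNat →
    ussFinish (ws.foldl (ussStep mw) (c, t)) = c ++ chunksOf (max mw 1).toNat (t ++ ws) := by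
  induction ws with
  | nil =>
    intro t c ht
    simp only [List.foldl_nil, List.append_nil, ussFinish]
    cases t with
    | nil => simp [chunksOf]
    | cons w tw =>
      rw [chunksOf.eq_def]
      simp only [List.length_cons] at ht
      have h1 : tw.take ((max mw 1).toNat - 1) = tw := List.take_of_length_le (by omega)
      have h2 : tw.drop ((max mw 1).toNat - 1) = [] := List.drop_eq_nil_of_le (by omega)
      simp [h1, h2, chunksOf]
  | cons w ws ih =>
    intro t c ht
    simp only [List.foldl_cons]
    rw [ussStep]
    simp only [List.length_append, List.length_singleton]
    by_cases hc : mw ≤ ((t.length + 1 : Nat) : Int)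
    · -- flush: the buffer reaches exactly s words
      have hs := (uss_cond_iff mw t.length).mp hc
      have hlen : (t ++ [w]).length = (max mw 1).toNat := by simp; omega
      rw [if_pos (by exact_mod_cast hc)]
      rw [ih [] (c ++ [PySem.Str.join " " (t ++ [w])]) (s_pos mw)]
      rw [chunksOf_eq_cons _ (s_pos mw) (t ++ w :: ws) (by simp)]
      have hsplit : t ++ w :: ws = (t ++ [w]) ++ ws := by simp
      rw [hsplit, ← hlen, List.take_left, List.drop_left]
      simp
    · have hlt : t.length + 1 < (max mw 1).toNat := by
        have := (uss_cond_iff mw t.length).not.mp hc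
        omega
      rw [if_neg (by exact_mod_cast hc)]
      rw [ih (t ++ [w]) c (by simpa using hlt)]
      simp

lemma pyRange_pos_shift (s b : Int) (hs : 0 < s) (hb : 0 < b) :
    PySem.List.pyRange 0 b s = 0 :: (PySem.List.pyRange 0 (b - s) s).map (· + s) := by
  rw [PySem.List.pyRange_of_pos 0 b hs, PySem.List.pyRange_of_pos 0 (b - s) hs]
  have hd : 0 ≤ (b - 1) / s := Int.ediv_nonneg (by omega) (by omega)
  have hN : (b - 0 + s - 1) / s = (b - 1) / s + 1 := by
    rw [show b - 0 + s - 1 = b - 1 + 1 * s by ring, Int.add_mul_ediv_right _ _ (by omega : s ≠ 0)]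
  have hN' : (if (0:Int) < b - s then ((b - s - 0 + s - 1) / s).toNat else 0) = ((b - 1) / s).toNat := by
    split_ifs with h
    · congr 1; ring_nf
    · have h0 : (b - 1) / s = 0 := Int.ediv_eq_zero_of_lt (by omega) (by omega)
      omega
  rw [if_pos hb, hN, hN', show ((b - 1) / s + 1).toNat = ((b - 1) / s).toNat + 1 by omega,
      List.range_succ_eq_map]
  simp only [List.map_cons, List.map_map, Nat.cast_zero, mul_zero, zero_add]
  congr 1
  exact List.map_congr_left fun k _ => by simp [Function.comp]; ring

lemma pyRange_nonpos (s b : Int) (hs : 0 < s) (hb : b ≤ 0) :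
    PySem.List.pyRange 0 b s = [] := by
  rw [PySem.List.pyRange_of_pos 0 b hs, if_neg (by omega)]
  simp

lemma slice_shift (ws : List String) (s i : Int) (hs : 0 < s) (hi : 0 ≤ i)
    (hib : i + s < (ws.length : Int)) :
    PySem.List.slice ws (some (i + s)) (some (i + s + s)) =
    PySem.List.slice (ws.drop s.toNat) (some i) (some (i + s)) := by
  simp only [PySem.List.slice, PySem.List.clampIdx]
  rw [if_neg (by omega), if_neg (by omega), if_neg (by omega), if_neg (by omega)]
  have hm : (ws.drop s.toNat).length = ws.length - s.toNat := List.length_drop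
  rw [List.drop_drop]
  have e1 : min (i + s).toNat ws.length = i.toNat + s.toNat := by omega
  have e2 : min i.toNat (ws.drop s.toNat).length = i.toNat := by omega
  have e3 : s.toNat + min i.toNat (ws.drop s.toNat).length = i.toNat + s.toNat := by omega
  have e4 : min (i + s + s).toNat ws.length - min (i + s).toNat ws.length
      = min (i + s).toNat (ws.drop s.toNat).length - min i.toNat (ws.drop s.toNat).length := by
    omega
  rw [e4, e1, e3]

lemma take_min_length {α : Type} (l : List α) (a : Nat) : l.take (min a l.length) = l.take a := by
  by_cases h : a ≤ l.length
  · rw [min_eq_left h]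
  · rw [min_eq_right (by omega), List.take_length, List.take_of_length_le (by omega)]

lemma loopB (s : Int) (hs : 0 < s) (ws : List String) :
    (PySem.List.pyRange 0 (ws.length : Int) s).map
      (fun i => PySem.Str.join " " (PySem.List.slice ws (some i) (some (i + s))))
    = chunksOf s.toNat ws := by
  suffices H : ∀ n (ws : List String), ws.length = n →
      (PySem.List.pyRange 0 (ws.length : Int) s).map
        (fun i => PySem.Str.join " " (PySem.List.slice ws (some i) (some (i + s))))
      = chunksOf s.toNat ws from H ws.length ws rfl
  intro n
  induction n using Nat.strong_induction_on with
  | _ n ih =>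
    intro ws hn
    cases ws with
    | nil => simp [pyRange_nonpos s 0 hs le_rfl, chunksOf]
    | cons w tl =>
      obtain ⟨k, hk⟩ : ∃ k, s.toNat = k + 1 := ⟨s.toNat - 1, by omega⟩
      have hb : 0 < (((w :: tl).length : Nat) : Int) := by simp
      rw [pyRange_pos_shift s _ hs hb, chunksOf.eq_def]
      simp only [List.map_cons, List.map_map]
      have hdrop : tl.drop (s.toNat - 1) = (w :: tl).drop s.toNat := by
        rw [hk]; simp
      congr 1
      · -- head chunk
        have : PySem.List.slice (w :: tl) (some 0) (some (0 + s)) = (w :: tl).take s.toNat := by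
          simp only [PySem.List.slice, PySem.List.clampIdx]
          rw [if_neg (by omega), if_neg (by omega)]
          simp only [zero_add, Int.toNat_zero, min_eq_left (Nat.zero_le _), List.drop_zero,
            Nat.sub_zero]
          exact take_min_length _ _
        rw [this, hk]
        simp
      · -- tail chunks
        rw [hdrop]
        by_cases hle : s.toNat ≤ (w :: tl).length
        · simp only [List.length_cons] at hle
          have hm : (((w :: tl).drop s.toNat).length : Int) = ((w :: tl).length : Int) - s := by
            simp [List.length_drop]; omega
          have hn' : tl.length + 1 = n := by simp only [List.length_cons] at hn; exact hn
          have ihlen : ((w :: tl).drop s.toNat).length < n := by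
            rw [List.length_drop]; simp only [List.length_cons]; omega
          rw [← ih _ ihlen ((w :: tl).drop s.toNat) rfl, hm]
          refine List.map_congr_left fun i hi => ?_
          have hmem := (PySem.List.mem_pyRange_iff_of_pos hs i).mp hi
          simp only [Function.comp]
          congr 1
          exact slice_shift (w :: tl) s i hs hmem.1 (by omega)
        · have hnil : (w :: tl).drop s.toNat = [] := List.drop_eq_nil_of_le (by omega)
          rw [hnil, pyRange_nonpos s _ hs (by omega)]
          simp [chunksOf]

-- ===== VERDICT (by name: the statement is the Claim_ definition above) =====
theorem ultra_split_sentences_spec : Claim_equal_ultra_split_sentences := by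
  intro paragraph max_words _
  unfold Spec_ultra_split_sentences ultra_split_sentences ultra_split_sentences_alt
  have h1 := loopA max_words (PySem.Str.split₀ (PySem.Str.strip paragraph)) [] []
    (by simp only [List.length_nil]; exact s_pos max_words)
  have h2 := loopB (max max_words 1) (by omega) (PySem.Str.split₀ (PySem.Str.strip paragraph))
  simp only [List.nil_append] at h1
  show ussFinish _ = _
  rw [h2, h1]
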